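-- pv_equiv track=rewrite | github.com/P9at4Kic/MIT-6.00 | Diophantine.py | Dio
-- ===== SOURCE A (Python) =====
-- def Dio (start, stop):
--     ns = []
--     nsn = []
--     for n in range(start, stop):
--         result = []
--         a = 0
--         while a * 6 <= n:
--             b = 0
--             while a * 6 + b * 9 <= n:
--                 c = 0
--                 while a * 6 + b * 9 + c * 20 <= n:
--                     if a * 6 + b * 9 + c * 20 == n:
--                         result.append([a, b, c])
--                     c += 1
--                 b += 1
--             a += 1
--         if len (result) == 0:
--             nsn.append(n)
--         else:
--             ns.append((n,result))
--     return ns, nsn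
-- ===== SOURCE B (Python) =====
-- def Dio(start, stop):
--     ns, nsn = [], []
--     for n in range(start, stop):
--         result = [[a, b, (n - 6 * a - 9 * b) // 20]
--                   for a in range(n // 6 + 1)
--                   for b in range((n - 6 * a) // 9 + 1)
--                   if (n - 6 * a - 9 * b) % 20 == 0]
--         if result:
--             ns.append((n, result))
--         else:
--             nsn.append(n)
--     return ns, nsn
-- ===== Notes on version B (the rewrite author's own statement) =====
-- stated objective: faster
-- what changed: The innermost scan over c is replaced by a direct divisibility test: for each (a,b) the candidate c is (n-6a-9b)//20 when 20 divides the remainder, and the a,b loops become range comprehensions with closed-form bounds.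
import Mathlib
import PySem

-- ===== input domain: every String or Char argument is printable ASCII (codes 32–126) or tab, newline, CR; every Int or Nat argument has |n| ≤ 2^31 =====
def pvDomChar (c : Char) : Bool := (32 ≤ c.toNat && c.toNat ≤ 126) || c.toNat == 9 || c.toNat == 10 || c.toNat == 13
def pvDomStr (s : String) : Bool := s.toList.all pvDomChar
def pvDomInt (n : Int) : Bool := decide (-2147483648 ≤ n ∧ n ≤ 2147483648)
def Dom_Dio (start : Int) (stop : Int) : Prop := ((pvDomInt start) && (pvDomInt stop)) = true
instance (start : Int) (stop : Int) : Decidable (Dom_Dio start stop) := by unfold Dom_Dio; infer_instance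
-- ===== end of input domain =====

-- B replaces A's innermost c-scan by a direct divisibility test (objective: faster, asymptotic).

-- ===== PORT A =====
-- the innermost 'while a*6 + b*9 + c*20 <= n' loop
def dioLoopC (n a b c : Int) (res : List (List Int)) : List (List Int) :=
  if _h : a * 6 + b * 9 + c * 20 ≤ n then
    dioLoopC n a b (c + 1)
      (res ++ (if a * 6 + b * 9 + c * 20 = n then [[a, b, c]] else []))
  else res
termination_by (n + 1 - (a * 6 + b * 9 + c * 20)).toNat
decreasing_by omega

-- the middle 'while a*6 + b*9 <= n' loop
def dioLoopB (n a b : Int) (res : List (List Int)) : List (List Int) :=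
  if _h : a * 6 + b * 9 ≤ n then
    dioLoopB n a (b + 1) (dioLoopC n a b 0 res)
  else res
termination_by (n + 1 - (a * 6 + b * 9)).toNat
decreasing_by omega

-- the outer 'while a*6 <= n' loop
def dioLoopA (n a : Int) (res : List (List Int)) : List (List Int) :=
  if _h : a * 6 ≤ n then
    dioLoopA n (a + 1) (dioLoopB n a 0 res)
  else res
termination_by (n + 1 - a * 6).toNat
decreasing_by omega

def Dio (start : Int) (stop : Int) : (List (Int × List (List Int))) × List Int :=
  (PySem.List.pyRange start stop 1).foldl
    (fun (st : List (Int × List (List Int)) × List Int) n =>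
      let result := dioLoopA n 0 []
      if result.length = 0 then (st.1, st.2 ++ [n])
      else (st.1 ++ [(n, result)], st.2))
    ([], [])

-- ===== PORT B =====
-- the comprehension: for a in range(n//6+1), for b in range((n-6a)//9+1), keep (a,b) with 20 | n-6a-9b
def dioAltResult (n : Int) : List (List Int) :=
  (PySem.List.pyRange 0 (PySem.Int.floordiv n 6 + 1) 1).flatMap (fun a =>
    (PySem.List.pyRange 0 (PySem.Int.floordiv (n - 6 * a) 9 + 1) 1).flatMap (fun b =>
      if PySem.Int.mod (n - 6 * a - 9 * b) 20 = 0 then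
        [[a, b, PySem.Int.floordiv (n - 6 * a - 9 * b) 20]]
      else []))

def Dio_alt (start : Int) (stop : Int) : (List (Int × List (List Int))) × List Int :=
  (PySem.List.pyRange start stop 1).foldl
    (fun (st : List (Int × List (List Int)) × List Int) n =>
      let result := dioAltResult n
      if result = [] then (st.1, st.2 ++ [n])
      else (st.1 ++ [(n, result)], st.2))
    ([], [])

-- ===== PRECONDITION & SPEC =====
def Spec_Dio (start : Int) (stop : Int) (out : (List (Int × List (List Int))) × List Int) : Prop := out = Dio_alt start stop
instance (start : Int) (stop : Int) (out : (List (Int × List (List Int))) × List Int) : Decidable (Spec_Dio start stop out) := by unfold Spec_Dio; infer_instance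

-- ===== CLAIM (what is proved, stated in full; the proofs are below) =====
def Claim_equal_Dio : Prop := ∀ (start : Int) (stop : Int), Dom_Dio start stop → Spec_Dio start stop (Dio start stop)

-- ===== LEMMAS AND PROOFS =====

theorem dioLoopC_eq (n a b : Int) : ∀ (c : Int) (res : List (List Int)),
    dioLoopC n a b c res =
      res ++ (if a * 6 + b * 9 + c * 20 ≤ n ∧ (n - a * 6 - b * 9) % 20 = 0
              then [[a, b, (n - a * 6 - b * 9) / 20]] else []) := by
  intro c res
  fun_induction dioLoopC n a b c res with
  | case1 c res h ih =>
    simp only [dite_eq_ite] at ih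
    rw [ih]
    by_cases he : a * 6 + b * 9 + c * 20 = n
    · have h20 : (n - a * 6 - b * 9) % 20 = 0 := by omega
      have hd : (n - a * 6 - b * 9) / 20 = c := by omega
      simp [he, h20, hd]
      omega
    · have hiff : ((a * 6 + b * 9 + (c+1) * 20 ≤ n ∧ 20 ∣ (n - a * 6 - b * 9)) ↔
              (a * 6 + b * 9 + c * 20 ≤ n ∧ 20 ∣ (n - a * 6 - b * 9))) := by omega
      simp only [PySem.Int.emod_eq_zero_iff_dvd] at *
      simp [he]
      rw [if_congr hiff rfl rfl]
  | case2 c res h =>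
    rw [if_neg (fun hc => h hc.1), List.append_nil]

theorem dioLoopB_eq (n a : Int) : ∀ (b : Int) (res : List (List Int)),
    dioLoopB n a b res =
      res ++ (PySem.List.pyRange b (PySem.Int.floordiv (n - 6 * a) 9 + 1) 1).flatMap (fun b =>
        if PySem.Int.mod (n - 6 * a - 9 * b) 20 = 0 then
          [[a, b, PySem.Int.floordiv (n - 6 * a - 9 * b) 20]]
        else []) := by
  have hfd : ∀ q : Int, q ≤ PySem.Int.floordiv (n - 6 * a) 9 ↔ q * 9 ≤ n - 6 * a := by
    intro q; exact PySem.Int.le_floordiv_iff_mul_le (by omega)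
  intro b res
  fun_induction dioLoopB n a b res with
  | case1 b res h ih =>
    rw [ih, dioLoopC_eq]
    have hb : b < PySem.Int.floordiv (n - 6 * a) 9 + 1 := by
      have := (hfd b).mpr (by omega); omega
    rw [PySem.List.pyRange_one_cons hb]
    have heq : n - 6 * a - 9 * b = n - a * 6 - b * 9 := by ring
    rw [List.flatMap_cons, heq,
        PySem.Int.mod_eq_emod_of_pos (a := n - a * 6 - b * 9) (by omega),
        PySem.Int.floordiv_eq_ediv_of_pos (a := n - a * 6 - b * 9) (by omega)]
    have hiff : ((a * 6 + b * 9 + 0 * 20 ≤ n ∧ (n - a * 6 - b * 9) % 20 = 0) ↔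
        ((n - a * 6 - b * 9) % 20 = 0)) := by omega
    rw [if_congr hiff rfl rfl, ← List.append_assoc]
  | case2 b res h =>
    have : PySem.Int.floordiv (n - 6 * a) 9 + 1 ≤ b := by
      by_contra hc
      exact h (by have := (hfd b).mp (by omega); omega)
    rw [PySem.List.pyRange_one_eq_nil this]
    simp

theorem dioLoopA_eq (n : Int) : ∀ (a : Int) (res : List (List Int)),
    dioLoopA n a res =
      res ++ (PySem.List.pyRange a (PySem.Int.floordiv n 6 + 1) 1).flatMap (fun a =>
        (PySem.List.pyRange 0 (PySem.Int.floordiv (n - 6 * a) 9 + 1) 1).flatMap (fun b =>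
          if PySem.Int.mod (n - 6 * a - 9 * b) 20 = 0 then
            [[a, b, PySem.Int.floordiv (n - 6 * a - 9 * b) 20]]
          else [])) := by
  have hfd : ∀ q : Int, q ≤ PySem.Int.floordiv n 6 ↔ q * 6 ≤ n := by
    intro q; exact PySem.Int.le_floordiv_iff_mul_le (by omega)
  intro a res
  fun_induction dioLoopA n a res with
  | case1 a res h ih =>
    rw [ih, dioLoopB_eq]
    have ha : a < PySem.Int.floordiv n 6 + 1 := by
      have := (hfd a).mpr (by omega); omega
    rw [PySem.List.pyRange_one_cons ha, List.flatMap_cons, ← List.append_assoc]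
  | case2 a res h =>
    have : PySem.Int.floordiv n 6 + 1 ≤ a := by
      by_contra hc
      exact h (by have := (hfd a).mp (by omega); omega)
    rw [PySem.List.pyRange_one_eq_nil this]
    simp

theorem dioResult_eq (n : Int) : dioLoopA n 0 [] = dioAltResult n := by
  rw [dioLoopA_eq, dioAltResult]; simp

-- ===== VERDICT (by name: the statement is the Claim_ definition above) =====
theorem Dio_spec : Claim_equal_Dio := by
  intro start stop _
  unfold Spec_Dio Dio Dio_alt
  congr 1
  funext st n
  simp only [dioResult_eq, List.length_eq_zero_iff]
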